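-- pv_equiv track=rewrite | github.com/MeowAWS/FindACar | aiml/description_embedding/description_rating_count.py | get_description_rating
-- ===== SOURCE A (Python) =====
-- def get_description_rating(document):
--     """
--     Get description_rating based on which rating key is set to 1.
--     Returns a number from 1 to 5, or 0 if has_description is 0.
--     """
--     # Check if has_description is 0
--     if 'has_description' in document and document['has_description'] == 0:
--         return 0
--
--     rating_map = {
--         "Excellent": 5,
--         "Above Average": 4,
--         "Average": 3,
--         "Below Average": 2,
--         "Bad": 1
--     }
--
--     # Check each rating key in the document
--     for rating_key, rating_value in rating_map.items():
--         if rating_key in document and document[rating_key] == 1: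
--             return rating_value
--
--     # Return None if no rating is found
--     return None
-- ===== SOURCE B (Python) =====
-- def get_description_rating(document):
--     """Aggregate-then-max: collect all matching rating values, return the max."""
--     if document.get('has_description') == 0:
--         return 0
--     rating_map = {
--         "Excellent": 5,
--         "Above Average": 4,
--         "Average": 3,
--         "Below Average": 2,
--         "Bad": 1
--     }
--     hits = [v for k, v in rating_map.items() if document.get(k) == 1]
--     return max(hits) if hits else None
-- ===== Notes on version B (the rewrite author's own statement) =====
-- stated objective: simpler
-- what changed: Replaced the ordered short-circuit scan over the rating map (early return at first key set to 1) with an aggregate-then-max: collect every matching rating value and return their maximum, which coincides with first-match because the map's values descend.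
import Mathlib
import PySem

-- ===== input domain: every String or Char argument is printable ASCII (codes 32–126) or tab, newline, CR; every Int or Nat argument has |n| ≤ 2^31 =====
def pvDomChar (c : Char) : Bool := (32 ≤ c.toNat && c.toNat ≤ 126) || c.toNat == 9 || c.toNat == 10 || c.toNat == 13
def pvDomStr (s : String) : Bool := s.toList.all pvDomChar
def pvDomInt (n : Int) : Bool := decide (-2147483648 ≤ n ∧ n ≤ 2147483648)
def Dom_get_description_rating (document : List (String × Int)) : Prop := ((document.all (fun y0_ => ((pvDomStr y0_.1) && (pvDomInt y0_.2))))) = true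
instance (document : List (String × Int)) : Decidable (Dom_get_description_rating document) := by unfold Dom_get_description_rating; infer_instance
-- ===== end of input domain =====

-- B replaces A's ordered short-circuit scan with aggregate-then-max over all matching keys (objective: simpler).

-- ===== PORT A =====
-- the loop: first rating key whose document value is 1 wins ('k in document and document[k] == 1' = get? = some 1)
def pvRatingLoopA (document : List (String × Int)) : List (String × Int) → Option Int
  | [] => none
  | (k, v) :: rest =>
      if PySem.Dict.get? ⟨document⟩ k == some 1 then some v
      else pvRatingLoopA document rest

def get_description_rating (document : List (String × Int)) : Option Int :=
  if PySem.Dict.get? ⟨document⟩ "has_description" == some 0 then some 0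
  else
    pvRatingLoopA document
      [("Excellent", 5), ("Above Average", 4), ("Average", 3), ("Below Average", 2), ("Bad", 1)]

-- ===== PORT B =====
def get_description_rating_alt (document : List (String × Int)) : Option Int :=
  if PySem.Dict.get? ⟨document⟩ "has_description" == some 0 then some 0
  else
    let hits : List Int :=
      ([("Excellent", (5 : Int)), ("Above Average", 4), ("Average", 3), ("Below Average", 2), ("Bad", 1)]).filterMap
        (fun kv => if PySem.Dict.get? ⟨document⟩ kv.1 == some 1 then some kv.2 else none)
    PySem.List.max? hits (fun x => x)

-- ===== PRECONDITION & SPEC =====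
def Spec_get_description_rating (document : List (String × Int)) (out : Option Int) : Prop := out = get_description_rating_alt document
instance (document : List (String × Int)) (out : Option Int) : Decidable (Spec_get_description_rating document out) := by unfold Spec_get_description_rating; infer_instance

-- ===== CLAIM (what is proved, stated in full; the proofs are below) =====
def Claim_equal_get_description_rating : Prop := ∀ (document : List (String × Int)), Dom_get_description_rating document → Spec_get_description_rating document (get_description_rating document)

-- ===== LEMMAS AND PROOFS =====

-- ===== VERDICT (by name: the statement is the Claim_ definition above) =====
theorem get_description_rating_spec : Claim_equal_get_description_rating := by
  intro document _
  unfold Spec_get_description_rating get_description_rating get_description_rating_alt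
  simp only [pvRatingLoopA, List.filterMap]
  split_ifs <;> simp_all <;> decide
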